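-- pv_equiv track=rewrite | github.com/hwanyeol/2022131006_-_- | 수프밍/1200.py | calculate_absolute_differences
-- ===== SOURCE A (Python) =====
-- def calculate_absolute_differences(lst):
--     absolute_diff_dict = {}
--     for i in range(len(lst)):
--         for j in range(i + 1, len(lst)):
--             difference = abs(lst[i] - lst[j])
--             if difference not in absolute_diff_dict:
--                 absolute_diff_dict[difference] = []
--             absolute_diff_dict[difference].append([min(lst[i], lst[j]), max(lst[i], lst[j])])
--
--     sorted_keys = sorted(absolute_diff_dict.keys())
--
--     result = []
--     for key in sorted_keys:
--         result += absolute_diff_dict[key]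
--
--     return result
-- ===== SOURCE B (Python) =====
-- def calculate_absolute_differences(lst):
--     n = len(lst)
--     counts = {}
--     for i in range(n):
--         for j in range(i + 1, n):
--             d = abs(lst[i] - lst[j])
--             counts[d] = counts.get(d, 0) + 1
--     offsets = {}
--     total = 0
--     for d in sorted(counts):
--         offsets[d] = total
--         total += counts[d]
--     out = [None] * total
--     for i in range(n):
--         for j in range(i + 1, n):
--             d = abs(lst[i] - lst[j])
--             out[offsets[d]] = [min(lst[i], lst[j]), max(lst[i], lst[j])]
--             offsets[d] += 1
--     return out
-- ===== Notes on version B (the rewrite author's own statement) =====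
-- stated objective: alternative
-- what changed: Replaces A's dict-of-lists grouping plus key-sorted concatenation by a counting sort: one pass counts pairs per absolute difference, the sorted distinct differences are turned into prefix-sum offsets, and a second pass places each pair directly at its computed position in a preallocated output list.
import Mathlib
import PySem

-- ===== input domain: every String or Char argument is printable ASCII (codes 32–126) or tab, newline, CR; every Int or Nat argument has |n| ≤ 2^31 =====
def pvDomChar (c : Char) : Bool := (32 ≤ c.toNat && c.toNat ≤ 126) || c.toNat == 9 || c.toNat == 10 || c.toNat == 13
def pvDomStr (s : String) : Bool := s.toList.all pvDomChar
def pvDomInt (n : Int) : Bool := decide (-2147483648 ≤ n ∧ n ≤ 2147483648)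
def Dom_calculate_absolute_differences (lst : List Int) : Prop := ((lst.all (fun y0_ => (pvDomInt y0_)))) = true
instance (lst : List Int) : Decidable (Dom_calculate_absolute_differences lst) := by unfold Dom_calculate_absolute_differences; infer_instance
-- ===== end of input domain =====

-- B replaces A's dict-of-lists grouping by a counting sort: it counts pairs per
-- difference, turns sorted distinct differences into prefix-sum offsets, and places
-- each pair directly at its computed position in a preallocated output (alternative).

-- ===== PORT A =====
def calculate_absolute_differences (lst : List Int) : List (List Int) :=
  let d : PySem.Dict Int (List (List Int)) :=
    (PySem.List.pyRange 0 (PySem.List.len lst) 1).foldl (fun d i =>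
      (PySem.List.pyRange (i + 1) (PySem.List.len lst) 1).foldl (fun d j =>
        let difference := |PySem.List.pyGetD lst i 0 - PySem.List.pyGetD lst j 0|
        let d := if !(d.contains difference) then d.insert difference [] else d
        d.insert difference (d.getD difference [] ++
          [[min (PySem.List.pyGetD lst i 0) (PySem.List.pyGetD lst j 0),
            max (PySem.List.pyGetD lst i 0) (PySem.List.pyGetD lst j 0)]])) d)
      PySem.Dict.empty
  let sorted_keys := PySem.List.sorted d.keys (fun k => k) false
  sorted_keys.foldl (fun result key => result ++ d.getD key []) []

-- ===== PORT B =====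
-- Python's '[None] * total' is modeled as 'List.replicate total.toNat []' — the []
-- placeholder stands for None and never surfaces: every slot is assigned exactly once.
-- 'out[offsets[d]] = v' is PySem.List.pySetD (offsets[d] is always a valid index here).
def calculate_absolute_differences_alt (lst : List Int) : List (List Int) :=
  let n := PySem.List.len lst
  let counts : PySem.Dict Int Int :=
    (PySem.List.pyRange 0 n 1).foldl (fun c i =>
      (PySem.List.pyRange (i + 1) n 1).foldl (fun c j =>
        let d := |PySem.List.pyGetD lst i 0 - PySem.List.pyGetD lst j 0|
        c.insert d (c.getD d 0 + 1)) c) PySem.Dict.empty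
  let ot := (PySem.List.sorted counts.keys (fun k => k) false).foldl
      (fun (ot : PySem.Dict Int Int × Int) d => (ot.1.insert d ot.2, ot.2 + counts.getD d 0))
      (PySem.Dict.empty, 0)
  let out0 : List (List Int) := List.replicate ot.2.toNat []
  let res := (PySem.List.pyRange 0 n 1).foldl (fun (s : List (List Int) × PySem.Dict Int Int) i =>
      (PySem.List.pyRange (i + 1) n 1).foldl (fun s j =>
        let d := |PySem.List.pyGetD lst i 0 - PySem.List.pyGetD lst j 0|
        (PySem.List.pySetD s.1 (s.2.getD d 0)
           [min (PySem.List.pyGetD lst i 0) (PySem.List.pyGetD lst j 0),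
            max (PySem.List.pyGetD lst i 0) (PySem.List.pyGetD lst j 0)],
         s.2.insert d (s.2.getD d 0 + 1))) s) (out0, ot.1)
  res.1

-- ===== PRECONDITION & SPEC =====
def Spec_calculate_absolute_differences (lst : List Int) (out : List (List Int)) : Prop := out = calculate_absolute_differences_alt lst
instance (lst : List Int) (out : List (List Int)) : Decidable (Spec_calculate_absolute_differences lst out) := by unfold Spec_calculate_absolute_differences; infer_instance

-- ===== CLAIM (what is proved, stated in full; the proofs are below) =====
def Claim_equal_calculate_absolute_differences : Prop := ∀ (lst : List Int), Dom_calculate_absolute_differences lst → Spec_calculate_absolute_differences lst (calculate_absolute_differences lst)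

-- ===== LEMMAS AND PROOFS =====

-- the flat stream of (difference, [min,max]) records, in i<j enumeration order
def pvPairs (lst : List Int) : List (Int × List Int) :=
  (PySem.List.pyRange 0 (PySem.List.len lst) 1).flatMap (fun i =>
    (PySem.List.pyRange (i + 1) (PySem.List.len lst) 1).map (fun j =>
      (|PySem.List.pyGetD lst i 0 - PySem.List.pyGetD lst j 0|,
       [min (PySem.List.pyGetD lst i 0) (PySem.List.pyGetD lst j 0),
        max (PySem.List.pyGetD lst i 0) (PySem.List.pyGetD lst j 0)])))

-- number of records with key k, and the k-group of a record stream
def pvCnt (P : List (Int × List Int)) (k : Int) : Nat := (P.filter (fun p => p.1 == k)).length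
def pvG (P : List (Int × List Int)) (k : Int) : List (List Int) := (P.filter (fun p => p.1 == k)).map (fun p => p.2)

-- prefix-sum base of key k in the sorted key list
def pvBaseN (cnt : Int → Nat) : List Int → Int → Nat
  | [], _ => 0
  | k' :: ks, k => if k = k' then 0 else cnt k' + pvBaseN cnt ks k

-- the partially filled output after placing the records xs
def pvModel (cnt : Int → Nat) (ks : List Int) (xs : List (Int × List Int)) : List (List Int) :=
  ks.flatMap (fun k => (xs.filter (fun p => p.1 == k)).map (fun p => p.2)
    ++ List.replicate (cnt k - (xs.filter (fun p => p.1 == k)).length) ([] : List Int))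

-- A's dict-update step is a 'modify'
theorem pv_step_eq_modify (d : PySem.Dict Int (List (List Int))) (k : Int) (v : List Int) :
    (let d' := if !(d.contains k) then d.insert k [] else d
     d'.insert k (d'.getD k [] ++ [v])) = d.modify k [] (· ++ [v]) := by
  by_cases h : d.contains k = true
  · simp [h, PySem.Dict.modify]
  · have h' : d.contains k = false := by simpa using h
    simp [h', PySem.Dict.modify, PySem.Dict.insert_insert_self,
      PySem.Dict.getD_of_not_contains d ([] : List (List Int)) h']

-- a nested i<j fold over any state is one fold over the flat record stream
theorem pv_nested_foldl {σ : Type} (lst : List Int) (f : σ → (Int × List Int) → σ) (s0 : σ) :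
    (PySem.List.pyRange 0 (PySem.List.len lst) 1).foldl (fun s i =>
      (PySem.List.pyRange (i + 1) (PySem.List.len lst) 1).foldl (fun s j =>
        f s (|PySem.List.pyGetD lst i 0 - PySem.List.pyGetD lst j 0|,
             [min (PySem.List.pyGetD lst i 0) (PySem.List.pyGetD lst j 0),
              max (PySem.List.pyGetD lst i 0) (PySem.List.pyGetD lst j 0)])) s) s0
    = (pvPairs lst).foldl f s0 := by
  rw [pvPairs, List.foldl_flatMap]
  refine PySem.List.foldl_congr_mem _ _ _ _ (fun s i _ => ?_)
  rw [List.foldl_map]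

theorem pv_flatMap_congr_mem {α β : Type} (l : List α) (f g : α → List β)
    (h : ∀ a ∈ l, f a = g a) : l.flatMap f = l.flatMap g := by
  induction l with
  | nil => rfl
  | cons a l ih =>
    simp only [List.flatMap_cons, h a (List.mem_cons_self), ih (fun a ha => h a (List.mem_cons_of_mem _ ha))]

-- count on the key stream = length of the key's filter
theorem pv_count_key (P : List (Int × List Int)) (k : Int) :
    (P.map (fun p => p.1)).count k = pvCnt P k := by
  induction P with
  | nil => rfl
  | cons p P ih =>
    by_cases h : p.1 = k <;>
      simp [pvCnt, h] <;>
      simpa [pvCnt] using ih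

-- getD is preserved by the offsets fold at other keys
theorem pv_off_fold_getD_other (cntI : Int → Int) (ks : List Int) (k : Int) (hk : k ∉ ks) :
    ∀ (d : PySem.Dict Int Int) (t : Int),
      ((ks.foldl (fun (ot : PySem.Dict Int Int × Int) x => (ot.1.insert x ot.2, ot.2 + cntI x)) (d, t)).1).getD k 0
        = d.getD k 0 := by
  induction ks with
  | nil => intro d t; rfl
  | cons k' ks ih =>
    intro d t
    have hne : k ≠ k' := fun h => hk (h ▸ List.mem_cons_self)
    rw [List.foldl_cons, ih (fun h => hk (List.mem_cons_of_mem _ h)),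
      PySem.Dict.getD_insert]
    simp [hne]

-- the offsets fold computes prefix sums over the sorted keys, and the total
theorem pv_off_fold (cntI : Int → Int) (cnt : Int → Nat) (hc : ∀ k, cntI k = (cnt k : Int)) :
    ∀ (ks : List Int), ks.Nodup → ∀ (d : PySem.Dict Int Int) (t : Int),
      (ks.foldl (fun (ot : PySem.Dict Int Int × Int) x => (ot.1.insert x ot.2, ot.2 + cntI x)) (d, t)).2
          = t + ((ks.map cnt).sum : Int)
      ∧ ∀ k ∈ ks,
        ((ks.foldl (fun (ot : PySem.Dict Int Int × Int) x => (ot.1.insert x ot.2, ot.2 + cntI x)) (d, t)).1).getD k 0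
          = t + (pvBaseN cnt ks k : Int) := by
  intro ks
  induction ks with
  | nil => intro _ d t; exact ⟨by simp, by simp⟩
  | cons k' ks ih =>
    intro hnd d t
    have hnd' := (List.nodup_cons.mp hnd).2
    have hk' : k' ∉ ks := (List.nodup_cons.mp hnd).1
    obtain ⟨ht, hgd⟩ := ih hnd' (d.insert k' t) (t + cntI k')
    constructor
    · rw [List.foldl_cons, ht, hc]
      push_cast [List.map_cons, List.sum_cons]
      ring
    · intro k hk
      rcases List.mem_cons.mp hk with h | h
      · subst h
        rw [List.foldl_cons, pv_off_fold_getD_other cntI ks k hk',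
          PySem.Dict.getD_insert]
        simp [pvBaseN]
      · have hne : k ≠ k' := fun he => hk' (he ▸ h)
        rw [List.foldl_cons, hgd k h, hc]
        simp only [pvBaseN, if_neg hne]
        push_cast; ring

-- the empty model is the preallocated output
theorem pv_model_nil (cnt : Int → Nat) (ks : List Int) :
    pvModel cnt ks [] = List.replicate (ks.map cnt).sum ([] : List Int) := by
  induction ks with
  | nil => rfl
  | cons k' ks ih =>
    have h : pvModel cnt (k' :: ks) [] = List.replicate (cnt k') ([] : List Int) ++ pvModel cnt ks [] := by
      simp [pvModel]
    rw [h, ih, List.map_cons, List.sum_cons, List.replicate_add]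

-- setting the first placeholder of a block appends to its filled part
theorem pv_block_set (mp : List (List Int)) (c : Nat) (v : List Int) :
    (mp ++ List.replicate (c + 1) ([] : List Int)).set mp.length v
      = (mp ++ [v]) ++ List.replicate c ([] : List Int) := by
  rw [List.set_append]
  simp [List.replicate_succ]

-- placing one record into the model sets the first placeholder of its key's block
theorem pv_model_set (cnt : Int → Nat) (ks : List Int) (hnd : ks.Nodup)
    (xs : List (Int × List Int)) (p : Int × List Int) (hk : p.1 ∈ ks)
    (hle : ∀ k, ((xs ++ [p]).filter (fun q => q.1 == k)).length ≤ cnt k) :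
    (pvModel cnt ks xs).set (pvBaseN cnt ks p.1 + (xs.filter (fun q => q.1 == p.1)).length) p.2
      = pvModel cnt ks (xs ++ [p]) := by
  induction ks with
  | nil => cases hk
  | cons k' ks ih =>
    have hnd' := (List.nodup_cons.mp hnd).2
    have hk'mem : k' ∉ ks := (List.nodup_cons.mp hnd).1
    simp only [pvModel, List.flatMap_cons]
    by_cases h : p.1 = k'
    · -- the record lands in the first block
      have hfa : (xs ++ [p]).filter (fun q => q.1 == k') = xs.filter (fun q => q.1 == k') ++ [p] := by
        simp [List.filter_append, h]
      have hm1 : (xs.filter (fun q => q.1 == k')).length + 1 ≤ cnt k' := by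
        have := hle k'
        rw [hfa] at this
        simpa using this
      obtain ⟨c, hc⟩ : ∃ c, cnt k' - (xs.filter (fun q => q.1 == k')).length = c + 1 :=
        ⟨cnt k' - (xs.filter (fun q => q.1 == k')).length - 1, by omega⟩
      have hrest : ∀ k ∈ ks, (xs ++ [p]).filter (fun q => q.1 == k) = xs.filter (fun q => q.1 == k) := by
        intro k hkk
        have : p.1 ≠ k := fun he => hk'mem (by rw [← he, h] at hkk; exact hkk)
        simp [List.filter_append, this]
      have hml : (xs.filter (fun q => q.1 == k')).length
          = ((xs.filter (fun q => q.1 == k')).map (fun p => p.2)).length := by simp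
      have hb : pvBaseN cnt (k' :: ks) k' = 0 := by simp [pvBaseN]
      rw [h, hb, Nat.zero_add, hc]
      rw [List.set_append, if_pos (by simp), hml, pv_block_set]
      rw [hfa, List.map_append]
      have hc2 : cnt k' - (xs.filter (fun q => q.1 == k') ++ [p]).length = c := by
        simp only [List.length_append, List.length_cons, List.length_nil]
        omega
      rw [hc2]
      have hfm : (ks.flatMap (fun k => ((xs ++ [p]).filter (fun q => q.1 == k)).map (fun q => q.2)
            ++ List.replicate (cnt k - ((xs ++ [p]).filter (fun q => q.1 == k)).length) ([] : List Int)))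
          = ks.flatMap (fun k => (xs.filter (fun q => q.1 == k)).map (fun q => q.2)
            ++ List.replicate (cnt k - (xs.filter (fun q => q.1 == k)).length) ([] : List Int)) :=
        pv_flatMap_congr_mem _ _ _ (fun k hkk => by rw [hrest k hkk])
      rw [hfm]
      simp only [List.map_cons, List.map_nil]
    · -- the record lands deeper; the first block is unchanged
      have hk2 : p.1 ∈ ks := by
        rcases List.mem_cons.mp hk with h' | h'
        · exact absurd h' h
        · exact h'
      have hfa : (xs ++ [p]).filter (fun q => q.1 == k') = xs.filter (fun q => q.1 == k') := by
        simp [List.filter_append, h]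
      have hlen : ((xs.filter (fun q => q.1 == k')).map (fun p => p.2)
          ++ List.replicate (cnt k' - (xs.filter (fun q => q.1 == k')).length) ([] : List Int)).length = cnt k' := by
        have := hle k'
        rw [hfa] at this
        simp
        omega
      have hb : pvBaseN cnt (k' :: ks) p.1 = cnt k' + pvBaseN cnt ks p.1 := by
        simp [pvBaseN, h]
      rw [hb]
      rw [List.set_append, if_neg (by rw [hlen]; omega), hlen]
      have hidx : cnt k' + pvBaseN cnt ks p.1 + (xs.filter (fun q => q.1 == p.1)).length - cnt k'
          = pvBaseN cnt ks p.1 + (xs.filter (fun q => q.1 == p.1)).length := by omega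
      rw [hidx, hfa]
      have hih := ih hnd' hk2
      rw [pvModel, pvModel] at hih
      rw [hih]

-- the placement fold maintains the model and the offsets
theorem pv_place_fold (cnt : Int → Nat) (ks : List Int) (hnd : ks.Nodup)
    (P : List (Int × List Int)) (hcnt : ∀ k, cnt k = pvCnt P k)
    (hkeys : ∀ p ∈ P, p.1 ∈ ks)
    (off0 : PySem.Dict Int Int) (hoff0 : ∀ k ∈ ks, off0.getD k 0 = (pvBaseN cnt ks k : Int)) :
    ∀ xs, xs <+: P →
      (xs.foldl (fun (s : List (List Int) × PySem.Dict Int Int) p =>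
          (PySem.List.pySetD s.1 (s.2.getD p.1 0) p.2, s.2.insert p.1 (s.2.getD p.1 0 + 1)))
        (pvModel cnt ks [], off0)).1 = pvModel cnt ks xs
      ∧ ∀ k ∈ ks,
        (xs.foldl (fun (s : List (List Int) × PySem.Dict Int Int) p =>
            (PySem.List.pySetD s.1 (s.2.getD p.1 0) p.2, s.2.insert p.1 (s.2.getD p.1 0 + 1)))
          (pvModel cnt ks [], off0)).2.getD k 0
          = (pvBaseN cnt ks k : Int) + ((xs.filter (fun q => q.1 == k)).length : Int) := by
  intro xs
  induction xs using List.reverseRecOn with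
  | nil => intro _; exact ⟨rfl, by simpa using hoff0⟩
  | append_singleton xs p ih =>
    intro hpre
    have hpre' : xs <+: P := (List.prefix_append xs [p]).trans hpre
    obtain ⟨hout, hoff⟩ := ih hpre'
    have hkp : p.1 ∈ ks := hkeys p (hpre.subset (by simp))
    have hle : ∀ k, ((xs ++ [p]).filter (fun q => q.1 == k)).length ≤ cnt k := by
      intro k
      rw [hcnt k, pvCnt]
      exact List.Sublist.length_le (hpre.sublist.filter _)
    rw [List.foldl_append, List.foldl_cons, List.foldl_nil]
    constructor
    · simp only [hout, hoff p.1 hkp]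
      have hcast : (pvBaseN cnt ks p.1 : Int) + ((xs.filter (fun q => q.1 == p.1)).length : Int)
          = ((pvBaseN cnt ks p.1 + (xs.filter (fun q => q.1 == p.1)).length : Nat) : Int) := by
        push_cast; ring
      rw [hcast, PySem.List.pySetD_natCast]
      exact pv_model_set cnt ks hnd xs p hkp hle
    · intro k hkk
      simp only [PySem.Dict.getD_insert]
      by_cases he : k = p.1
      · subst he
        rw [if_pos rfl, hoff p.1 hkk]
        have h2 : (xs ++ [p]).filter (fun q => q.1 == p.1) = xs.filter (fun q => q.1 == p.1) ++ [p] := by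
          simp [List.filter_append]
        rw [h2]
        push_cast [List.length_append, List.length_cons, List.length_nil]
        ring
      · rw [if_neg he, hoff k hkk]
        have : (xs ++ [p]).filter (fun q => q.1 == k) = xs.filter (fun q => q.1 == k) := by
          have : p.1 ≠ k := fun h' => he h'.symm
          simp [List.filter_append, this]
        rw [this]

-- the full model is the concatenation of the groups over the keys
theorem pv_model_full (cnt : Int → Nat) (ks : List Int) (P : List (Int × List Int))
    (hcnt : ∀ k, cnt k = pvCnt P k) :
    pvModel cnt ks P = ks.flatMap (pvG P) := by
  refine pv_flatMap_congr_mem _ _ _ (fun k _ => ?_)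
  rw [hcnt k, pvCnt, pvG]
  simp

-- A's nested dict loop is one fold of 'modify' over the flat record stream
theorem pv_dict_eq (lst : List Int) :
    (PySem.List.pyRange 0 (PySem.List.len lst) 1).foldl (fun d i =>
      (PySem.List.pyRange (i + 1) (PySem.List.len lst) 1).foldl (fun d j =>
        let difference := |PySem.List.pyGetD lst i 0 - PySem.List.pyGetD lst j 0|
        let d := if !(d.contains difference) then d.insert difference [] else d
        d.insert difference (d.getD difference [] ++
          [[min (PySem.List.pyGetD lst i 0) (PySem.List.pyGetD lst j 0),
            max (PySem.List.pyGetD lst i 0) (PySem.List.pyGetD lst j 0)]])) d)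
      PySem.Dict.empty
    = (pvPairs lst).foldl (fun d p => d.modify p.1 [] (fun x => x ++ [p.2])) PySem.Dict.empty := by
  rw [pvPairs, List.foldl_flatMap]
  refine PySem.List.foldl_congr_mem _ _ _ _ (fun d i _ => ?_)
  rw [List.foldl_map]
  exact PySem.List.foldl_congr_mem _ _ _ _ (fun d j _ => pv_step_eq_modify d _ _)

-- B's counting loop is Counter of the key stream
theorem pv_counts_eq (lst : List Int) :
    (PySem.List.pyRange 0 (PySem.List.len lst) 1).foldl (fun (c : PySem.Dict Int Int) i =>
      (PySem.List.pyRange (i + 1) (PySem.List.len lst) 1).foldl (fun c j =>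
        c.insert (|PySem.List.pyGetD lst i 0 - PySem.List.pyGetD lst j 0|)
          (c.getD (|PySem.List.pyGetD lst i 0 - PySem.List.pyGetD lst j 0|) 0 + 1)) c)
      PySem.Dict.empty
    = PySem.Dict.counter ((pvPairs lst).map (fun p => p.1)) :=
  (pv_nested_foldl lst (fun (c : PySem.Dict Int Int) p => c.insert p.1 (c.getD p.1 0 + 1)) (PySem.Dict.empty : PySem.Dict Int Int)).trans
    ((List.foldl_map (f := fun p : Int × List Int => p.1)
        (g := fun (d : PySem.Dict Int Int) x => d.insert x (d.getD x 0 + 1))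
        (l := pvPairs lst) (init := PySem.Dict.empty)).symm.trans
      (PySem.Dict.foldl_insert_getD_add_one_eq_counter _))

-- B's placement loop is one fold over the flat record stream
theorem pv_place_eq (lst : List Int) (s0 : List (List Int) × PySem.Dict Int Int) :
    (PySem.List.pyRange 0 (PySem.List.len lst) 1).foldl (fun (s : List (List Int) × PySem.Dict Int Int) i =>
      (PySem.List.pyRange (i + 1) (PySem.List.len lst) 1).foldl (fun s j =>
        (PySem.List.pySetD s.1 (s.2.getD (|PySem.List.pyGetD lst i 0 - PySem.List.pyGetD lst j 0|) 0)
           [min (PySem.List.pyGetD lst i 0) (PySem.List.pyGetD lst j 0),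
            max (PySem.List.pyGetD lst i 0) (PySem.List.pyGetD lst j 0)],
         s.2.insert (|PySem.List.pyGetD lst i 0 - PySem.List.pyGetD lst j 0|)
           (s.2.getD (|PySem.List.pyGetD lst i 0 - PySem.List.pyGetD lst j 0|) 0 + 1))) s) s0
    = (pvPairs lst).foldl (fun (s : List (List Int) × PySem.Dict Int Int) p =>
        (PySem.List.pySetD s.1 (s.2.getD p.1 0) p.2, s.2.insert p.1 (s.2.getD p.1 0 + 1))) s0 :=
  pv_nested_foldl lst
    (fun s p => (PySem.List.pySetD s.1 (s.2.getD p.1 0) p.2, s.2.insert p.1 (s.2.getD p.1 0 + 1))) s0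

-- A's port evaluates to the group concatenation over the sorted distinct keys
theorem pv_A_eq (lst : List Int) :
    calculate_absolute_differences lst
      = (PySem.List.sorted (PySem.Set.ofList ((pvPairs lst).map (fun p => p.1))) (fun k => k) false).flatMap
          (pvG (pvPairs lst)) := by
  unfold calculate_absolute_differences
  rw [pv_dict_eq]
  dsimp only
  rw [PySem.Dict.keys_foldl_modify_key (pvPairs lst) (fun p => p.1) [] (fun _ p => (· ++ [p.2])) PySem.Dict.empty]
  rw [PySem.List.foldl_append_eq_flatMap
    (fun key => ((pvPairs lst).foldl (fun (d : PySem.Dict Int (List (List Int))) p => d.modify p.1 [] (fun x => x ++ [p.2])) PySem.Dict.empty).getD key [])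
    (PySem.List.sorted (PySem.Set.update (PySem.Dict.empty (κ := Int) (ν := List (List Int))).keys ((pvPairs lst).map (fun p => p.1))) (fun k => k)) []]
  simp only [PySem.Dict.keys_empty, PySem.Set.update_nil_left]
  refine pv_flatMap_congr_mem _ _ _ (fun k _ => ?_)
  rw [PySem.Dict.getD_foldl_modify_append, PySem.Dict.getD_empty, List.nil_append, pvG]

-- B's port evaluates to the same group concatenation
set_option maxHeartbeats 1000000 in
theorem pv_B_eq (lst : List Int) :
    calculate_absolute_differences_alt lst
      = (PySem.List.sorted (PySem.Set.ofList ((pvPairs lst).map (fun p => p.1))) (fun k => k) false).flatMap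
          (pvG (pvPairs lst)) := by
  unfold calculate_absolute_differences_alt
  dsimp only
  rw [pv_counts_eq, PySem.Dict.keys_counter]
  have hc : ∀ k, (PySem.Dict.counter ((pvPairs lst).map (fun p => p.1))).getD k 0
      = ((pvCnt (pvPairs lst) k : Nat) : Int) := by
    intro k
    rw [PySem.Dict.getD_counter, pv_count_key]
  have hnd : (PySem.List.sorted (PySem.Set.ofList ((pvPairs lst).map (fun p => p.1))) (fun k => k) false).Nodup := by
    have hperm := PySem.List.sorted_perm (PySem.Set.ofList ((pvPairs lst).map (fun p => p.1))) (fun k => k) false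
    exact hperm.nodup_iff.mpr (PySem.Set.nodup_ofList _)
  obtain ⟨htot, hgd⟩ := pv_off_fold
    (fun k => (PySem.Dict.counter ((pvPairs lst).map (fun p => p.1))).getD k 0)
    (pvCnt (pvPairs lst)) hc
    (PySem.List.sorted (PySem.Set.ofList ((pvPairs lst).map (fun p => p.1))) (fun k => k) false)
    hnd PySem.Dict.empty 0
  beta_reduce at htot hgd
  rw [htot]
  simp only [zero_add, Int.toNat_natCast]
  rw [← pv_model_nil, pv_place_eq]
  have hkeys : ∀ p ∈ pvPairs lst,
      p.1 ∈ PySem.List.sorted (PySem.Set.ofList ((pvPairs lst).map (fun p => p.1))) (fun k => k) false := by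
    intro p hp
    rw [PySem.List.mem_sorted, PySem.Set.mem_ofList]
    exact List.mem_map_of_mem hp
  obtain ⟨hfin, _⟩ := pv_place_fold (pvCnt (pvPairs lst))
    (PySem.List.sorted (PySem.Set.ofList ((pvPairs lst).map (fun p => p.1))) (fun k => k) false)
    hnd (pvPairs lst) (fun _ => rfl) hkeys _
    (fun k hk => by rw [hgd k hk]; simp) (pvPairs lst) (List.prefix_refl _)
  rw [hfin, pv_model_full _ _ _ (fun _ => rfl)]

-- ===== VERDICT (by name: the statement is the Claim_ definition above) =====
theorem calculate_absolute_differences_spec : Claim_equal_calculate_absolute_differences := by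
  intro lst _
  unfold Spec_calculate_absolute_differences
  rw [pv_A_eq, pv_B_eq]
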